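-- pv_equiv track=rewrite | github.com/Konubinix/Devel | python/konixls.py | decimal_to_base26
-- ===== SOURCE A (Python) =====
-- def decimal_to_base26(value):
--     assert value>0
--     value = value - 1
--     d, m = divmod(value, 26)
--     res = chr(m + ord("a"))
--     if d:
--         return decimal_to_base26(d) + res
--     else:
--         return res
-- ===== SOURCE B (Python) =====
-- def decimal_to_base26(value):
--     assert value > 0
--     digits = []
--     while value > 0:
--         value, m = divmod(value - 1, 26)
--         digits.append(chr(m + ord('a')))
--     return ''.join(reversed(digits))
-- ===== Notes on version B (the rewrite author's own statement) =====
-- stated objective: alternative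
-- what changed: Replaces A's recursion (which builds the string most-significant-digit-first via recursive string concatenation) with a tail loop that appends digits least-significant-first to a list and joins the reversed list at the end.
import Mathlib
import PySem

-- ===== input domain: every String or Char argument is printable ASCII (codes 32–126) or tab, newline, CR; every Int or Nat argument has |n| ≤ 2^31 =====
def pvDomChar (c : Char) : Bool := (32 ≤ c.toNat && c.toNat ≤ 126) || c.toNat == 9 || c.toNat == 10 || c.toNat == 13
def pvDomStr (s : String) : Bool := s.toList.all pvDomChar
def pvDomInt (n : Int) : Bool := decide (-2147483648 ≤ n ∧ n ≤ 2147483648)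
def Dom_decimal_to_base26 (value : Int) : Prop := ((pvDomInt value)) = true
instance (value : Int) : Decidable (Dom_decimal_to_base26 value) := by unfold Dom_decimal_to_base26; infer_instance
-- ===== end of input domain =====

-- B replaces A's recursion with a loop appending digits to a list, joined in reverse at the end (same cost).

-- termination helper cited by both ports: the quotient value strictly shrinks
theorem pvB26_quot_lt (v : Int) (h : ¬ v ≤ 0) :
    (PySem.Int.floordiv (v - 1) 26).toNat < v.toNat := by
  have hd : PySem.Int.floordiv (v - 1) 26 = (v - 1) / 26 :=
    PySem.Int.floordiv_eq_ediv_of_pos (by omega)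
  have h1 : (v - 1) / 26 ≤ v - 1 := Int.ediv_le_self _ (by omega)
  have h2 : (0:Int) ≤ (v - 1) / 26 := Int.ediv_nonneg (by omega) (by omega)
  rw [hd]; omega

-- ===== PORT A =====
-- recursion: value -= 1; d, m = divmod(value, 26); res = chr(m+97); recurse on d if d ≠ 0
def decimal_to_base26 (value : Int) : String :=
  if h : value ≤ 0 then ""  -- assert value>0 fails: excluded by Pre_
  else
    let v := value - 1
    let d := PySem.Int.floordiv v 26
    let m := PySem.Int.mod v 26
    let res := String.ofList [Char.ofNat (m + 97).toNat]
    if d ≠ 0 then decimal_to_base26 d ++ res else res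
termination_by value.toNat
decreasing_by exact pvB26_quot_lt value h

-- ===== PORT B =====
-- the while loop: while value>0: value, m = divmod(value-1, 26); digits.append(chr(m+97))
def b26digits (value : Int) (digits : List Char) : List Char :=
  if h : value ≤ 0 then digits
  else
    b26digits (PySem.Int.floordiv (value - 1) 26)
      (digits ++ [Char.ofNat (PySem.Int.mod (value - 1) 26 + 97).toNat])
termination_by value.toNat
decreasing_by exact pvB26_quot_lt value h

def decimal_to_base26_alt (value : Int) : String :=
  -- assert value > 0 (fails outside Pre_); digits = []; the loop; ''.join(reversed(digits))
  String.ofList (b26digits value []).reverse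

-- ===== PRECONDITION & SPEC =====
-- Pre_: A's assert raises AssertionError for value ≤ 0; those inputs are excluded.
def Pre_decimal_to_base26 (value : Int) : Prop := 0 < value
instance (value : Int) : Decidable (Pre_decimal_to_base26 value) := by unfold Pre_decimal_to_base26; infer_instance
def pvWitness_decimal_to_base26 : Int := (1)

def Spec_decimal_to_base26 (value : Int) (out : String) : Prop := out = decimal_to_base26_alt value
instance (value : Int) (out : String) : Decidable (Spec_decimal_to_base26 value out) := by unfold Spec_decimal_to_base26; infer_instance

-- ===== CLAIM (what is proved, stated in full; the proofs are below) =====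
def Claim_equal_decimal_to_base26 : Prop := ∀ (value : Int), Dom_decimal_to_base26 value → Pre_decimal_to_base26 value → Spec_decimal_to_base26 value (decimal_to_base26 value)

-- ===== LEMMAS AND PROOFS =====

-- Loop invariant: for positive v, the loop appends A's digit string reversed onto the accumulator.
theorem b26digits_eq (n : Nat) (v : Int) (hn : v.toNat = n) (hv : 0 < v) (ds : List Char) :
    b26digits v ds = ds ++ (decimal_to_base26 v).toList.reverse := by
  induction n using Nat.strong_induction_on generalizing v ds with
  | _ n ih =>
    have hnle : ¬ v ≤ 0 := by omega
    rw [b26digits, decimal_to_base26]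
    simp only [hnle, dif_neg, not_false_iff]
    set d := PySem.Int.floordiv (v - 1) 26 with hdd
    have hd26 : d = (v - 1) / 26 := PySem.Int.floordiv_eq_ediv_of_pos (by omega)
    have hdle : d ≤ v - 1 := by rw [hd26]; exact Int.ediv_le_self _ (by omega)
    have hdnn : (0:Int) ≤ d := by rw [hd26]; exact Int.ediv_nonneg (by omega) (by omega)
    by_cases hd0 : d = 0
    · rw [hd0, b26digits]
      simp [String.toList_ofList]
    · have hdpos : 0 < d := lt_of_le_of_ne hdnn (Ne.symm hd0)
      have hlt : d.toNat < n := by have := pvB26_quot_lt v hnle; omega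
      rw [ih d.toNat hlt d rfl hdpos]
      simp [hd0, String.toList_ofList]

theorem decimal_to_base26_spec : Claim_equal_decimal_to_base26 := by
  intro v _ hv
  unfold Spec_decimal_to_base26 decimal_to_base26_alt
  rw [b26digits_eq v.toNat v rfl hv, List.nil_append, List.reverse_reverse,
    String.ofList_toList]
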